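-- pv_equiv track=rewrite | github.com/fulL549/Algorithm_Design_and_Analysis | homework1/main.py | min_max_pages
-- ===== SOURCE A (Python) =====
-- from typing import List
--
-- def is_possible(pages: List[int], m: int, max_allowed: int) -> bool:
--     """判断在每个学生最多读 max_allowed 页的限制下，是否能用不超过 m 个学生分配所有书。
--
--     使用贪心：从左到右累加，超过 max_allowed 时分配给下一个学生。
--     """
--     students_required = 1
--     current_sum = 0
--     for p in pages:
--         if p > max_allowed:
--             # 单本书页数已超过限制，不可行
--             return False
--         if current_sum + p <= max_allowed:
--             current_sum += p
--         else:
--             students_required += 1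
--             current_sum = p
--             if students_required > m:
--                 return False
--     return True
--
-- def min_max_pages(pages: List[int], m: int) -> int:
--     """返回将 pages 分配给 m 个学生时的最小可能的最大页数。"""
--     if not pages:
--         return 0
--
--     # 如果学生数大于书本数，无法给每个学生分配连续的书
--     if m > len(pages):
--         raise ValueError(f"学生数({m})不能大于书本数({len(pages)})，无法给每个学生分配连续的书")
--
--     # 如果学生数等于书本数，每个学生分配一本书
--     if m == len(pages):
--         return max(pages)
--
--     left = max(pages)
--     right = sum(pages)
--     answer = right
--     while left <= right:
--         mid = (left + right) // 2
--         if is_possible(pages, m, mid):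
--             answer = mid
--             right = mid - 1
--         else:
--             left = mid + 1
--     return answer
-- ===== SOURCE B (Python) =====
-- from typing import List
--
-- def min_max_pages(pages: List[int], m: int) -> int:
--     """返回将 pages 分配给 m 个学生时的最小可能的最大页数。
--
--     前缀和 + 区间划分 DP：dp[i] = 把前 i 本书分给当前学生数时最小的最大页数。
--     """
--     if not pages:
--         return 0
--     n = len(pages)
--     if m > n:
--         raise ValueError(f"学生数({m})不能大于书本数({n})，无法给每个学生分配连续的书")
--     prefix = [0]
--     for p in pages:
--         prefix.append(prefix[-1] + p)
--     dp = prefix[:]  # 一个学生：前 i 本书的总页数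
--     for k in range(2, m + 1):
--         dp = [dp[i] if i < k else
--               min(max(dp[j], prefix[i] - prefix[j]) for j in range(k - 1, i))
--               for i in range(n + 1)]
--     return dp[n]
-- ===== Notes on version B (the rewrite author's own statement) =====
-- stated objective: alternative
-- what changed: Replaces the binary search over the answer range with greedy feasibility checks by a prefix-sum interval-partition DP (dp[i] = minimal max load for the first i books), looping over student counts 2..m; guards (empty list -> 0, m > len raises ValueError) are kept, and m == len / m <= 1 fall out of the same DP.
-- outside the precondition, e.g. on min_max_pages([5, -3, 2], 2): A returns 4, B returns 2; on min_max_pages([8, 1, -6, 8, -2, 7], 2): A returns 11, B returns 8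
import Mathlib
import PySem

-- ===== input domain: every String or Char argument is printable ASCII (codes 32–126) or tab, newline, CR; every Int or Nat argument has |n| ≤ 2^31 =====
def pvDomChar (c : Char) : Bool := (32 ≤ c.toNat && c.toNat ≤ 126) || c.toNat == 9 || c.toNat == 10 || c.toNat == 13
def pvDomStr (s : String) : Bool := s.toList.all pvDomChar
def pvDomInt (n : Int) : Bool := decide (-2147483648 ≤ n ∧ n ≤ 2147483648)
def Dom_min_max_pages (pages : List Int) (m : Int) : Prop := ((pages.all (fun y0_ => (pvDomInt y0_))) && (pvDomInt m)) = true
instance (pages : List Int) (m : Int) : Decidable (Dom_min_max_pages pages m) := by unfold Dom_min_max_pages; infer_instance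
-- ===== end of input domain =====

-- B replaces A's binary search over the answer range (greedy feasibility checks) by a prefix-sum
-- interval-partition DP over student counts; same return value on Pre_ (the task's natural domain).

-- ===== PORT A =====

-- the loop body of is_possible, step for step (early returns become recursion results)
def isPossibleGo (m max_allowed : Int) : List Int → Int → Int → Bool
  | [], _, _ => true
  | p :: rest, students_required, current_sum =>
    if p > max_allowed then false
    else if current_sum + p ≤ max_allowed then
      isPossibleGo m max_allowed rest students_required (current_sum + p)
    else if students_required + 1 > m then false
    else isPossibleGo m max_allowed rest (students_required + 1) p

def is_possible (pages : List Int) (m : Int) (max_allowed : Int) : Bool :=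
  isPossibleGo m max_allowed pages 1 0

-- the `while left <= right` loop of A's binary search
def bsearchA (pages : List Int) (m : Int) (left right answer : Int) : Int :=
  if _h : left ≤ right then
    let mid := PySem.Int.floordiv (left + right) 2
    if is_possible pages m mid then bsearchA pages m left (mid - 1) mid
    else bsearchA pages m (mid + 1) right answer
  else answer
termination_by (right + 1 - left).toNat
decreasing_by
  · have := PySem.Int.floordiv_two_mid_bounds (lo := left) (hi := right) _h
    omega
  · have := PySem.Int.floordiv_two_mid_bounds (lo := left) (hi := right) _h
    omega

def min_max_pages (pages : List Int) (m : Int) : Int :=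
  if pages = [] then 0
  else if m > PySem.List.len pages then 0   -- A raises ValueError here: excluded by Pre_min_max_pages
  else if m = PySem.List.len pages then ((PySem.List.max? pages (fun x => x)).getD 0)
  else
    let left := (PySem.List.max? pages (fun x => x)).getD 0
    let right := pages.sum
    bsearchA pages m left right right

-- ===== PORT B =====

-- one iteration of B's `for k in range(2, m + 1)` loop: the next dp row (a list comprehension)
def dpRow (prefix' : List Int) (n : Nat) (dp : List Int) (k : Int) : List Int :=
  (PySem.List.pyRange 0 ((n : Int) + 1) 1).map (fun i =>
    if i < k then PySem.List.pyGetD dp i 0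
    else
      (PySem.List.min? ((PySem.List.pyRange (k - 1) i 1).map (fun j =>
        max (PySem.List.pyGetD dp j 0)
            (PySem.List.pyGetD prefix' i 0 - PySem.List.pyGetD prefix' j 0)))
        (fun x => x)).getD 0)

def min_max_pages_alt (pages : List Int) (m : Int) : Int :=
  if pages = [] then 0
  else
    let n := pages.length
    if m > PySem.List.len pages then 0   -- B raises ValueError here: excluded by Pre_min_max_pages
    else
      let prefix' := pages.scanl (· + ·) 0       -- the prefix.append loop
      let dp0 := prefix'                          -- dp = prefix[:]
      let dp := (PySem.List.pyRange 2 (m + 1) 1).foldl (dpRow prefix' n) dp0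
      PySem.List.pyGetD dp (n : Int) 0

-- ===== PRECONDITION & SPEC =====
-- Pre_ keeps the task's natural domain. It excludes m > len(pages) on nonempty input (A raises
-- ValueError there), and it excludes lists containing a negative page count when 2 ≤ m < len(pages):
-- negative page counts are outside the task's natural domain, and there A's binary search over
-- [max, sum] with a non-monotone greedy check returns a search-path-dependent value that no
-- contiguous partition attains.
def Pre_min_max_pages (pages : List Int) (m : Int) : Prop :=
  pages = [] ∨ (m ≤ pages.length ∧ (m ≤ 1 ∨ m = pages.length ∨ ∀ p ∈ pages, 0 ≤ p))
instance (pages : List Int) (m : Int) : Decidable (Pre_min_max_pages pages m) := by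
  unfold Pre_min_max_pages; infer_instance

def pvWitness_min_max_pages : List Int × Int := ([12, 34, 67, 90], 2)

def Spec_min_max_pages (pages : List Int) (m : Int) (out : Int) : Prop := out = min_max_pages_alt pages m
instance (pages : List Int) (m : Int) (out : Int) : Decidable (Spec_min_max_pages pages m out) := by unfold Spec_min_max_pages; infer_instance

-- ===== CLAIM (what is proved, stated in full; the proofs are below) =====
def Claim_equal_min_max_pages : Prop := ∀ (pages : List Int) (m : Int), Dom_min_max_pages pages m → Pre_min_max_pages pages m → Spec_min_max_pages pages m (min_max_pages pages m)

-- ===== LEMMAS AND PROOFS =====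

def pfx (l : List Int) (t : Nat) : Int := (l.take t).sum

def best (l : List Int) : Nat → Nat → Int
  | 0, i => pfx l i
  | K + 1, i =>
    if h : (Finset.Icc (K + 1) (i - 1)).Nonempty then
      (Finset.Icc (K + 1) (i - 1)).inf' h (fun j => max (best l K j) (pfx l i - pfx l j))
    else 0

theorem pfx_zero (l : List Int) : pfx l 0 = 0 := rfl

theorem pfx_succ (l : List Int) (t : Nat) (ht : t < l.length) :
    pfx l (t + 1) = pfx l t + l.getD t 0 := by
  unfold pfx
  rw [List.take_add_one, List.sum_append]
  simp [List.getElem?_eq_getElem ht, List.getD]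

theorem pfx_stable (l : List Int) (t : Nat) (ht : l.length ≤ t) : pfx l t = l.sum := by
  simp [pfx, List.take_of_length_le ht]

theorem getD_nonneg (l : List Int) (hn : ∀ p ∈ l, 0 ≤ p) (t : Nat) : 0 ≤ l.getD t 0 := by
  by_cases ht : t < l.length
  · have : l.getD t 0 = l[t] := List.getD_eq_getElem l 0 ht
    rw [this]; exact hn _ (List.getElem_mem ht)
  · rw [List.getD_eq_default l 0 (by omega)]

theorem pfx_le_succ (l : List Int) (hn : ∀ p ∈ l, 0 ≤ p) (t : Nat) :
    pfx l t ≤ pfx l (t + 1) := by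
  by_cases ht : t < l.length
  · rw [pfx_succ l t ht]; have := getD_nonneg l hn t; omega
  · rw [pfx_stable l t (by omega), pfx_stable l (t+1) (by omega)]

theorem pfx_mono (l : List Int) (hn : ∀ p ∈ l, 0 ≤ p) {r j : Nat} (h : r ≤ j) :
    pfx l r ≤ pfx l j := by
  induction j with
  | zero => have : r = 0 := by omega
            simp [this]
  | succ j ih =>
    rcases Nat.lt_or_ge r (j+1) with h1 | h1
    · exact le_trans (ih (by omega)) (pfx_le_succ l hn j)
    · have hr : r = j + 1 := by omega
      simp [hr]

theorem pfx_nonneg (l : List Int) (hn : ∀ p ∈ l, 0 ≤ p) (t : Nat) : 0 ≤ pfx l t := by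
  have := pfx_mono l hn (Nat.zero_le t)
  simpa [pfx_zero] using this

theorem pfx_len (l : List Int) : pfx l l.length = l.sum := pfx_stable l _ le_rfl

theorem elem_le_seg (l : List Int) (hn : ∀ p ∈ l, 0 ≤ p) {r t j : Nat}
    (h1 : r ≤ t) (h2 : t < j) (h3 : t < l.length) :
    l.getD t 0 ≤ pfx l j - pfx l r := by
  have e := pfx_succ l t h3
  have m1 := pfx_mono l hn h1
  have m2 := pfx_mono l hn (show t + 1 ≤ j by omega)
  omega

theorem best_zero (l : List Int) (i : Nat) : best l 0 i = pfx l i := rfl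

theorem best_succ (l : List Int) (K i : Nat) (hi : K + 2 ≤ i) :
    best l (K + 1) i =
      (Finset.Icc (K + 1) (i - 1)).inf' ⟨K + 1, by simp; omega⟩
        (fun j => max (best l K j) (pfx l i - pfx l j)) := by
  rw [best, dif_pos]

-- membership-style bound: any split point j gives an upper bound

theorem best_succ_le (l : List Int) (K i j : Nat) (hj1 : K + 1 ≤ j) (hj2 : j ≤ i - 1)
    (hi : K + 2 ≤ i) (x : Int) (h1 : best l K j ≤ x) (h2 : pfx l i - pfx l j ≤ x) :
    best l (K + 1) i ≤ x := by
  rw [best_succ l K i hi]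
  have hmem : j ∈ Finset.Icc (K + 1) (i - 1) := Finset.mem_Icc.mpr ⟨hj1, hj2⟩
  refine le_trans (Finset.inf'_le _ hmem) ?_
  exact max_le h1 h2

-- witness extraction

theorem best_succ_witness (l : List Int) (K i : Nat) (hi : K + 2 ≤ i) (x : Int)
    (h : best l (K + 1) i ≤ x) :
    ∃ j, K + 1 ≤ j ∧ j ≤ i - 1 ∧ best l K j ≤ x ∧ pfx l i - pfx l j ≤ x := by
  rw [best_succ l K i hi] at h
  rcases (Finset.inf'_le_iff _).mp h with ⟨j, hj, hle⟩
  rw [Finset.mem_Icc] at hj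
  exact ⟨j, hj.1, hj.2, le_trans (le_max_left _ _) hle, le_trans (le_max_right _ _) hle⟩

theorem best_le_pfx (l : List Int) (hn : ∀ p ∈ l, 0 ≤ p) :
    ∀ K i, K < i → i ≤ l.length → best l K i ≤ pfx l i := by
  intro K
  induction K with
  | zero => intro i _ _; simp [best_zero]
  | succ K ih =>
    intro i hKi hin
    refine best_succ_le l K i (i - 1) (by omega) le_rfl (by omega) _ ?_ ?_
    · exact le_trans (ih (i-1) (by omega) (by omega)) (pfx_mono l hn (by omega))
    · have := pfx_nonneg l hn (i - 1)
      omega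

theorem elem_le_best (l : List Int) (hn : ∀ p ∈ l, 0 ≤ p) :
    ∀ K i t, K < i → i ≤ l.length → t < i → l.getD t 0 ≤ best l K i := by
  intro K
  induction K with
  | zero =>
    intro i t _ hin ht
    simp only [best_zero]
    have h := elem_le_seg l hn (Nat.zero_le t) ht (by omega)
    have h0 : pfx l 0 = 0 := pfx_zero l
    omega
  | succ K ih =>
    intro i t hKi hin ht
    rw [best_succ l K i (by omega)]
    rw [Finset.le_inf'_iff]
    intro j hj
    simp at hj
    rcases Nat.lt_or_ge t j with h1 | h1
    · exact le_trans (ih j t (by omega) (by omega) h1) (le_max_left _ _)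
    · exact le_trans (elem_le_seg l hn h1 ht (by omega)) (le_max_right _ _)

-- the diagonal recurrence: exactly singleton segments

theorem best_diag_step (l : List Int) (K : Nat) (h : K + 2 ≤ l.length) :
    best l (K + 1) (K + 2) = max (best l K (K + 1)) (l.getD (K + 1) 0) := by
  rw [best_succ l K (K + 2) le_rfl]
  have hstep : pfx l (K + 2) = pfx l (K + 1) + l.getD (K + 1) 0 :=
    pfx_succ l (K + 1) (by omega)
  apply le_antisymm
  · refine le_trans (Finset.inf'_le _ (Finset.mem_Icc.mpr ⟨le_rfl, by omega⟩)) ?_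
    have : pfx l (K + 2) - pfx l (K + 1) = l.getD (K + 1) 0 := by omega
    rw [this]
  · refine Finset.le_inf' _ _ ?_
    intro j hj
    rw [Finset.mem_Icc] at hj
    have hjj : j = K + 1 := by omega
    subst hjj
    have : pfx l (K + 2) - pfx l (K + 1) = l.getD (K + 1) 0 := by omega
    rw [this]

theorem best_pad (l : List Int) (hn : ∀ p ∈ l, 0 ≤ p) :
    ∀ K i x, K + 1 < i → i ≤ l.length → best l K i ≤ x → best l (K + 1) i ≤ x := by
  intro K
  induction K with
  | zero =>
    intro i x hKi hin h
    simp only [best_zero] at h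
    refine best_succ_le l 0 i 1 le_rfl (by omega) (by omega) x ?_ ?_
    · simp only [best_zero]
      exact le_trans (pfx_mono l hn (by omega)) h
    · have := pfx_nonneg l hn 1
      omega
  | succ K ih =>
    intro i x hKi hin h
    rcases best_succ_witness l K i (by omega) x h with ⟨j, hj1, hj2, hbj, hseg⟩
    rcases Nat.lt_or_ge (K + 1) j with hcase | hcase
    · -- j ≥ K + 2: pad the prefix
      exact best_succ_le l (K + 1) i j (by omega) (by omega) (by omega) x
        (ih j x (by omega) (by omega) hbj) hseg
    · -- j = K + 1: split off a singleton at K + 1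
      have hj : j = K + 1 := by omega
      subst hj
      refine best_succ_le l (K + 1) i (K + 2) le_rfl (by omega) (by omega) x ?_ ?_
      · rw [best_diag_step l K (by omega)]
        refine max_le hbj ?_
        exact le_trans (elem_le_seg l hn (le_refl (K+1)) (by omega) (by omega)) hseg
      · have step : pfx l (K + 2) = pfx l (K + 1) + l.getD (K + 1) 0 :=
          pfx_succ l (K + 1) (by omega)
        have hget := getD_nonneg l hn (K + 1)
        omega

-- partition of the index interval [r, e) into at most q nonempty contiguous pieces, each of sum ≤ x

inductive ffE (l : List Int) (x : Int) : Nat → Nat → Nat → Prop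
  | nil (q e : Nat) : ffE l x q e e
  | step (q r j e : Nat) (hrj : r < j) (hj : j ≤ e) (hseg : pfx l j - pfx l r ≤ x)
      (htail : ffE l x q j e) : ffE l x (q + 1) r e

theorem ffE_mono (l : List Int) (x : Int) {q r e : Nat} (h : ffE l x q r e) :
    ffE l x (q + 1) r e := by
  induction h with
  | nil q e => exact ffE.nil (q + 1) e
  | step q r j e hrj hj hseg htail ih => exact ffE.step (q + 1) r j e hrj hj hseg ih

theorem ffE_skip (l : List Int) (x : Int) (hn : ∀ p ∈ l, 0 ≤ p) {q r e : Nat}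
    (h : ffE l x q r e) (he : e ≤ l.length) :
    ∀ t, r ≤ t → t ≤ e → ffE l x q t e := by
  induction h with
  | nil q e => intro t h1 h2
               have ht : t = e := by omega
               rw [ht]; exact ffE.nil q e
  | step q r j e hrj hj hseg htail ih =>
    intro t h1 h2
    rcases Nat.lt_trichotomy t j with hc | hc | hc
    · refine ffE.step q t j e hc hj ?_ htail
      have := pfx_mono l hn h1
      omega
    · subst hc; exact ffE_mono l x htail
    · exact ffE_mono l x (ih (by omega) t (by omega) h2)

theorem ffE_snoc (l : List Int) (x : Int) {q r j : Nat} (h : ffE l x q r j)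
    {i : Nat} (hji : j < i) (hseg : pfx l i - pfx l j ≤ x) : ffE l x (q + 1) r i := by
  induction h with
  | nil q e => exact ffE.step q e i i hji (le_refl i) hseg (ffE.nil q i)
  | step q r j' e hrj' hj' hseg' htail ih =>
    exact ffE.step (q + 1) r j' i hrj' (by omega) hseg' (ih hji hseg)

theorem best_to_ffE (l : List Int) (x : Int) :
    ∀ K i, K < i → best l K i ≤ x → ffE l x (K + 1) 0 i := by
  intro K
  induction K with
  | zero =>
    intro i hi h
    rw [best_zero] at h
    refine ffE.step 0 0 i i hi (le_refl i) ?_ (ffE.nil 0 i)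
    rw [pfx_zero]; omega
  | succ K ih =>
    intro i hi h
    rcases best_succ_witness l K i (by omega) x h with ⟨j, hj1, hj2, hbj, hseg⟩
    exact ffE_snoc l x (ih j (by omega) hbj) (by omega) hseg

theorem ffE_pos (l : List Int) (x : Int) {p t e : Nat} (h : ffE l x p t e) (ht : t < e) :
    1 ≤ p := by
  cases h with
  | nil => omega
  | step => omega

-- greedy soundness: a successful run of is_possible's loop yields a partition witness

theorem sound_go (l : List Int) (x m' : Int) (hn : ∀ p ∈ l, 0 ≤ p) (hl : 0 < l.length)
    (t q r : Nat) (ht : t ≤ l.length) (hrt : r ≤ t)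
    (hinv : (q = 0 ∧ r = 0) ∨ (1 ≤ q ∧ q ≤ r ∧ best l (q - 1) r ≤ x))
    (hcur : pfx l t - pfx l r ≤ x)
    (hqm : (q : Int) + 1 ≤ m')
    (hgo : isPossibleGo m' x (l.drop t) ((q : Int) + 1) (pfx l t - pfx l r) = true) :
    ∃ q' : Nat, (q' : Int) + 1 ≤ m' ∧ q' < l.length ∧ best l q' l.length ≤ x := by
  rcases Nat.lt_or_ge t l.length with htn | htn
  · -- one loop step
    rw [List.drop_eq_getElem_cons htn] at hgo
    rw [isPossibleGo] at hgo
    have hget : l[t] = l.getD t 0 := (List.getD_eq_getElem l 0 htn).symm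
    rw [hget] at hgo
    by_cases h1 : l.getD t 0 > x
    · rw [if_pos h1] at hgo; simp at hgo
    rw [if_neg h1] at hgo
    by_cases h2 : pfx l t - pfx l r + l.getD t 0 ≤ x
    · rw [if_pos h2] at hgo
      have hstep : pfx l (t + 1) = pfx l t + l.getD t 0 := pfx_succ l t htn
      have : pfx l t - pfx l r + l.getD t 0 = pfx l (t + 1) - pfx l r := by omega
      rw [this] at hgo
      exact sound_go l x m' hn hl (t + 1) q r (by omega) (by omega) hinv (by omega) hqm hgo
    · rw [if_neg h2] at hgo
      -- split: current segment is nonempty (r < t)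
      have hrltt : r < t := by
        rcases Nat.lt_or_ge r t with h | h
        · exact h
        · exfalso
          have : r = t := by omega
          subst this
          omega
      by_cases h3 : (q : Int) + 1 + 1 > m'
      · rw [if_pos h3] at hgo; simp at hgo
      rw [if_neg h3] at hgo
      -- close the current segment [r, t)
      have hbq : best l q t ≤ x := by
        rcases hinv with ⟨hq0, hr0⟩ | ⟨hq1, hqr, hb⟩
        · subst hq0; subst hr0
          rw [best_zero]
          have h0 : pfx l 0 = 0 := pfx_zero l
          omega
        · obtain ⟨q0, rfl⟩ : ∃ q0, q = q0 + 1 := ⟨q - 1, by omega⟩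
          refine best_succ_le l q0 t r (by omega) (by omega) (by omega) x ?_ ?_
          · simpa using hb
          · exact hcur
      have hstep : pfx l (t + 1) = pfx l t + l.getD t 0 := pfx_succ l t htn
      have hcur' : pfx l (t + 1) - pfx l t ≤ x := by omega
      have hgo' : isPossibleGo m' x (l.drop (t + 1)) ((q : Int) + 1 + 1)
          (pfx l (t + 1) - pfx l t) = true := by
        have : (l.getD t 0 : Int) = pfx l (t + 1) - pfx l t := by omega
        rwa [this] at hgo
      have : ((q + 1 : Nat) : Int) + 1 = (q : Int) + 1 + 1 := by push_cast; ring
      exact sound_go l x m' hn hl (t + 1) (q + 1) t (by omega) (by omega)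
        (Or.inr ⟨by omega, by omega, by simpa using hbq⟩) hcur' (by omega) (by rw [this]; exact hgo')
  · -- end of the list: close the final segment
    have htn' : t = l.length := by omega
    subst htn'
    rcases Nat.lt_or_ge r l.length with hr | hr
    · -- nonempty final segment
      rcases hinv with ⟨hq0, hr0⟩ | ⟨hq1, hqr, hb⟩
      · subst hq0; subst hr0
        refine ⟨0, by simpa using hqm, hl, ?_⟩
        rw [best_zero]
        have h0 : pfx l 0 = 0 := pfx_zero l
        omega
      · obtain ⟨q0, rfl⟩ : ∃ q0, q = q0 + 1 := ⟨q - 1, by omega⟩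
        refine ⟨q0 + 1, by omega, by omega, ?_⟩
        refine best_succ_le l q0 l.length r (by omega) (by omega) (by omega) x ?_ hcur
        simpa using hb
    · -- r = length: the run closed exactly at the end
      have hr' : r = l.length := by omega
      subst hr'
      rcases hinv with ⟨hq0, hr0⟩ | ⟨hq1, hqr, hb⟩
      · omega
      · exact ⟨q - 1, by omega, by omega, hb⟩
termination_by l.length - t

-- greedy completeness: a partition witness forces the loop to succeed

theorem complete_go (l : List Int) (x m' : Int) (hn : ∀ p ∈ l, 0 ≤ p)
    (t q r p : Nat) (ht : t ≤ l.length) (hrt : r ≤ t)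
    (hff : ffE l x p r l.length)
    (hqp : (q : Int) + (p : Int) ≤ m') :
    isPossibleGo m' x (l.drop t) ((q : Int) + 1) (pfx l t - pfx l r) = true := by
  rcases Nat.lt_or_ge t l.length with htn | htn
  · rw [List.drop_eq_getElem_cons htn]
    rw [isPossibleGo]
    have hget : l[t] = l.getD t 0 := (List.getD_eq_getElem l 0 htn).symm
    rw [hget]
    -- the skipped witness starting at t
    have hfft : ffE l x p t l.length := ffE_skip l x hn hff le_rfl t hrt (by omega)
    have helem : l.getD t 0 ≤ x := by
      cases hfft with
      | nil => omega
      | step p' t j e hrj hj hseg htail =>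
        exact le_trans (elem_le_seg l hn le_rfl hrj htn) hseg
    rw [if_neg (by omega)]
    by_cases h2 : pfx l t - pfx l r + l.getD t 0 ≤ x
    · rw [if_pos h2]
      have hstep : pfx l (t + 1) = pfx l t + l.getD t 0 := pfx_succ l t htn
      have : pfx l t - pfx l r + l.getD t 0 = pfx l (t + 1) - pfx l r := by omega
      rw [this]
      exact complete_go l x m' hn (t + 1) q r p (by omega) (by omega) hff hqp
    · rw [if_neg h2]
      -- the witness's first segment ends at j1 ≤ t
      cases hff with
      | nil => omega
      | step p1 r j1 e hrj1 hj1 hseg1 htail1 =>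
        have hstep : pfx l (t + 1) = pfx l t + l.getD t 0 := pfx_succ l t htn
        have hj1t : j1 ≤ t := by
          by_contra hcon
          have hj1' : t + 1 ≤ j1 := by omega
          have := pfx_mono l hn hj1'
          omega
        have hffj : ffE l x p1 t l.length := ffE_skip l x hn htail1 le_rfl t hj1t (by omega)
        have hp1 : 1 ≤ p1 := ffE_pos l x hffj htn
        rw [if_neg (by omega)]
        have hcast : ((q + 1 : Nat) : Int) + 1 = (q : Int) + 1 + 1 := by push_cast; ring
        have hrec := complete_go l x m' hn (t + 1) (q + 1) t p1 (by omega) (by omega) hffj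
          (by push_cast; push_cast at hqp; omega)
        rw [hcast] at hrec
        have : pfx l (t + 1) - pfx l t = l.getD t 0 := by omega
        rw [this] at hrec
        exact hrec
  · have : l.drop t = [] := List.drop_eq_nil_of_le (by omega)
    rw [this, isPossibleGo]
termination_by l.length - t

theorem best_pad_chain (l : List Int) (hn : ∀ p ∈ l, 0 ≤ p) (x : Int) :
    ∀ K K', K ≤ K' → K' < l.length → best l K l.length ≤ x → best l K' l.length ≤ x := by
  intro K K' hKK' hK' h
  obtain ⟨d, rfl⟩ : ∃ d, K' = K + d := ⟨K' - K, by omega⟩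
  clear hKK'
  induction d with
  | zero => simpa using h
  | succ d ih =>
    have hprev : best l (K + d) l.length ≤ x := ih (by omega)
    exact best_pad l hn (K + d) l.length x (by omega) le_rfl hprev

theorem go_one (l : List Int) (x m' : Int) (hm : m' ≤ 1) (t : Nat) (ht : t ≤ l.length) :
    isPossibleGo m' x (l.drop t) 1 (pfx l t) = true ↔
      ∀ u, t ≤ u → u < l.length → (l.getD u 0 ≤ x ∧ pfx l (u + 1) ≤ x) := by
  rcases Nat.lt_or_ge t l.length with htn | htn
  · rw [List.drop_eq_getElem_cons htn, isPossibleGo]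
    have hget : l[t] = l.getD t 0 := (List.getD_eq_getElem l 0 htn).symm
    rw [hget]
    have hstep : pfx l (t + 1) = pfx l t + l.getD t 0 := pfx_succ l t htn
    by_cases h1 : l.getD t 0 > x
    · rw [if_pos h1]
      refine iff_of_false (by simp) ?_
      intro hall
      exact absurd ((hall t le_rfl htn).1) (by omega)
    rw [if_neg h1]
    by_cases h2 : pfx l t + l.getD t 0 ≤ x
    · rw [if_pos h2]
      have hrw : pfx l t + l.getD t 0 = pfx l (t + 1) := by omega
      rw [hrw]
      rw [go_one l x m' hm (t + 1) (by omega)]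
      constructor
      · intro hrest u hu1 hu2
        rcases Nat.lt_or_ge t u with hc | hc
        · exact hrest u (by omega) hu2
        · have : u = t := by omega
          subst this
          exact ⟨by omega, by omega⟩
      · intro hall u hu1 hu2
        exact hall u (by omega) hu2
    · rw [if_neg h2]
      have hsplit : (1 : Int) + 1 > m' := by omega
      rw [if_pos hsplit]
      refine iff_of_false (by simp) ?_
      intro hall
      have := (hall t le_rfl htn).2
      omega
  · have hdrop : l.drop t = [] := List.drop_eq_nil_of_le (by omega)
    rw [hdrop, isPossibleGo]
    refine iff_of_true rfl ?_
    intro u hu1 hu2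
    omega
termination_by l.length - t

-- running maximum of all single pages and all prefix sums (the m ≤ 1 feasibility threshold)

def M1 (l : List Int) : Int :=
  ((List.range l.length).map (fun u => max (l.getD u 0) (pfx l (u + 1)))).foldl max
    (pfx l l.length)

theorem M1_le_iff (l : List Int) (x : Int) :
    M1 l ≤ x ↔ (pfx l l.length ≤ x ∧ ∀ u, u < l.length →
      (l.getD u 0 ≤ x ∧ pfx l (u + 1) ≤ x)) := by
  unfold M1
  constructor
  · intro h
    have h1 := (PySem.List.le_foldl_max
      ((List.range l.length).map (fun u => max (l.getD u 0) (pfx l (u + 1)))) (pfx l l.length)).1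
    have h2 := (PySem.List.le_foldl_max
      ((List.range l.length).map (fun u => max (l.getD u 0) (pfx l (u + 1)))) (pfx l l.length)).2
    refine ⟨by omega, ?_⟩
    intro u hu
    have hmem : max (l.getD u 0) (pfx l (u + 1)) ∈
        (List.range l.length).map (fun u => max (l.getD u 0) (pfx l (u + 1))) :=
      List.mem_map.mpr ⟨u, List.mem_range.mpr hu, rfl⟩
    have := h2 _ hmem
    have hmax1 := le_max_left (l.getD u 0) (pfx l (u + 1))
    have hmax2 := le_max_right (l.getD u 0) (pfx l (u + 1))
    exact ⟨by omega, by omega⟩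
  · rintro ⟨hsum, hall⟩
    rcases PySem.List.foldl_max_mem
      ((List.range l.length).map (fun u => max (l.getD u 0) (pfx l (u + 1)))) (pfx l l.length)
      with hcase | hcase
    · omega
    · rcases List.mem_map.mp hcase with ⟨u, hu, heq⟩
      have := hall u (List.mem_range.mp hu)
      rw [← heq]
      rcases max_cases (l.getD u 0) (pfx l (u + 1)) with ⟨h, _⟩ | ⟨h, _⟩ <;> omega

theorem sum_le_M1 (l : List Int) : pfx l l.length ≤ M1 l :=
  (PySem.List.le_foldl_max _ _).1

theorem F_iff_M1 (l : List Int) (x m' : Int) (hm : m' ≤ 1) (hl : 0 < l.length) :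
    is_possible l m' x = true ↔ M1 l ≤ x := by
  unfold is_possible
  have h0 : l.drop 0 = l := List.drop_zero
  have hp0 : pfx l 0 = 0 := pfx_zero l
  have := go_one l x m' hm 0 (by omega)
  rw [h0, hp0] at this
  rw [this, M1_le_iff]
  constructor
  · intro hall
    refine ⟨?_, fun u hu => hall u (by omega) hu⟩
    obtain ⟨n0, hn0⟩ : ∃ n0, l.length = n0 + 1 := ⟨l.length - 1, by omega⟩
    have := (hall (l.length - 1) (by omega) (by omega)).2
    have hrw : l.length - 1 + 1 = l.length := by omega
    rwa [hrw] at this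
  · rintro ⟨_, hall⟩ u _ hu
    exact hall u hu

theorem bs_main (pages : List Int) (m T : Int)
    (hF : ∀ y, (is_possible pages m y = true) ↔ T ≤ y) :
    ∀ (k : Nat) (lo hi a : Int), (hi + 1 - lo).toNat ≤ k → lo ≤ T → T ≤ hi + 1 →
      (T = hi + 1 → a = T) → bsearchA pages m lo hi a = T := by
  intro k
  induction k with
  | zero =>
    intro lo hi a hk h1 h2 h3
    rw [bsearchA]
    rw [dif_neg (by omega)]
    omega
  | succ k ih =>
    intro lo hi a hk h1 h2 h3
    rw [bsearchA]
    by_cases hlh : lo ≤ hi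
    · rw [dif_pos hlh]
      have hmid := PySem.Int.floordiv_two_mid_bounds (lo := lo) (hi := hi) hlh
      set mid := PySem.Int.floordiv (lo + hi) 2 with hmiddef
      by_cases hT : T ≤ mid
      · rw [if_pos ((hF mid).mpr hT)]
        exact ih lo (mid - 1) mid (by omega) h1 (by omega) (by omega)
      · rw [if_neg (fun h => hT ((hF mid).mp h))]
        exact ih (mid + 1) hi a (by omega) (by omega) h2 h3
    · rw [dif_neg hlh]
      omega

theorem bs_never (pages : List Int) (m : Int) :
    ∀ (k : Nat) (lo hi a : Int), (hi + 1 - lo).toNat ≤ k →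
      (∀ y, lo ≤ y → y ≤ hi → ¬ (is_possible pages m y = true)) →
      bsearchA pages m lo hi a = a := by
  intro k
  induction k with
  | zero =>
    intro lo hi a hk hnone
    rw [bsearchA, dif_neg (by omega)]
  | succ k ih =>
    intro lo hi a hk hnone
    rw [bsearchA]
    by_cases hlh : lo ≤ hi
    · rw [dif_pos hlh]
      have hmid := PySem.Int.floordiv_two_mid_bounds (lo := lo) (hi := hi) hlh
      set mid := PySem.Int.floordiv (lo + hi) 2 with hmiddef
      rw [if_neg (hnone mid (by omega) (by omega))]
      exact ih (mid + 1) hi a (by omega) (fun y hy1 hy2 => hnone y (by omega) hy2)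
    · rw [dif_neg hlh]

theorem elem_all (l : List Int) (c : Int) (h : ∀ t, t < l.length → l.getD t 0 ≤ c) :
    ∀ y ∈ l, y ≤ c := by
  intro y hy
  rcases List.mem_iff_getElem.mp hy with ⟨t, ht, rfl⟩
  have := h t ht
  rwa [List.getD_eq_getElem l 0 ht] at this

theorem fold_max_le (tl : List Int) (h c : Int) (h1 : h ≤ c) (h2 : ∀ y ∈ tl, y ≤ c) :
    tl.foldl max h ≤ c := by
  rcases PySem.List.foldl_max_mem tl h with hcase | hcase
  · omega
  · exact h2 _ hcase

-- the central equivalence: greedy feasibility is exactly "the DP optimum is ≤ x"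

theorem F_iff_T (l : List Int) (m' : Int) (hn : ∀ p ∈ l, 0 ≤ p) (hl : 0 < l.length)
    (hm1 : 1 ≤ m') (hmn : m' ≤ l.length) (x : Int) :
    is_possible l m' x = true ↔ best l (m'.toNat - 1) l.length ≤ x := by
  have hK : m'.toNat - 1 < l.length := by omega
  by_cases hx : 0 ≤ x
  · constructor
    · intro hgo
      have h0 : pfx l 0 - pfx l 0 = 0 := by omega
      have hgo' : isPossibleGo m' x (l.drop 0) (((0 : Nat) : Int) + 1)
          (pfx l 0 - pfx l 0) = true := by
        simpa [List.drop_zero, h0] using hgo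
      rcases sound_go l x m' hn hl 0 0 0 (by omega) le_rfl (Or.inl ⟨rfl, rfl⟩)
          (by omega) (by omega) hgo' with ⟨q', hq'm, hq'n, hbest⟩
      exact best_pad_chain l hn x q' (m'.toNat - 1) (by omega) hK hbest
    · intro hbest
      have hffE : ffE l x (m'.toNat - 1 + 1) 0 l.length :=
        best_to_ffE l x (m'.toNat - 1) l.length hK hbest
      have hmrw : m'.toNat - 1 + 1 = m'.toNat := by omega
      rw [hmrw] at hffE
      have := complete_go l x m' hn 0 0 0 m'.toNat (by omega) le_rfl hffE (by omega)
      have h0 : pfx l 0 - pfx l 0 = 0 := by omega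
      simp only [List.drop_zero, h0] at this
      simpa [is_possible] using this
  · -- x < 0: both sides are false
    obtain ⟨h, tl, rfl⟩ : ∃ h tl, l = h :: tl := by
      cases l with
      | nil => simp at hl
      | cons h tl => exact ⟨h, tl, rfl⟩
    have hh : 0 ≤ h := hn h (by simp)
    refine iff_of_false ?_ ?_
    · simp [is_possible, isPossibleGo]
      intro hcon
      omega
    · intro hcon
      have := elem_le_best (h :: tl) hn (m'.toNat - 1) (h :: tl).length 0 hK le_rfl (by simp)
      simp only [List.getD_cons_zero] at this
      omega

theorem best_diag_fold (l : List Int) :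
    ∀ K, K < l.length → best l K (K + 1) = ((l.drop 1).take K).foldl max (l.getD 0 0) := by
  intro K
  induction K with
  | zero =>
    intro h
    rw [best_zero]
    have := pfx_succ l 0 h
    rw [pfx_zero] at this
    simpa using this
  | succ K ih =>
    intro h
    rw [best_diag_step l K (by omega)]
    rw [ih (by omega)]
    have hlen : K < (l.drop 1).length := by
      rw [List.length_drop]; omega
    rw [List.take_add_one, List.getElem?_eq_getElem hlen, List.foldl_append]
    simp only [Option.toList_some, List.foldl_cons, List.foldl_nil]
    congr 1
    rw [List.getElem_drop]
    rw [List.getD_eq_getElem l 0 (show K + 1 < l.length by omega)]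
    congr 1
    omega

theorem maxq_cons (h : Int) (tl : List Int) :
    (PySem.List.max? (h :: tl) (fun x => x)).getD 0 = tl.foldl max h := by
  rw [PySem.List.max?_id_cons]
  rfl

theorem scanl_getD (l : List Int) :
    ∀ (a : Int) (i : Nat), i ≤ l.length →
      (List.scanl (· + ·) a l).getD i 0 = a + pfx l i := by
  induction l with
  | nil =>
    intro a i hi
    have : i = 0 := by simpa using hi
    subst this
    simp [pfx_zero]
  | cons p rest ih =>
    intro a i hi
    rw [List.scanl_cons]
    cases i with
    | zero => simp [pfx_zero]
    | succ i =>
      simp only [List.getD_cons_succ]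
      rw [ih (a + p) i (by simpa using hi)]
      have : pfx (p :: rest) (i + 1) = p + pfx rest i := by
        simp [pfx, List.take_succ_cons]
      rw [this]
      ring

theorem scanl_length (a : Int) (l : List Int) :
    (List.scanl (· + ·) a l).length = l.length + 1 := List.length_scanl ..

theorem minfold (F : Nat → Int) :
    ∀ (d a : Nat),
      ((List.range d).map (fun t => F (a + 1 + t))).foldl min (F a) =
        (Finset.Icc a (a + d)).inf' ⟨a, by simp⟩ F := by
  intro d
  induction d with
  | zero =>
    intro a
    simp only [List.range_zero, List.map_nil, List.foldl_nil]
    apply le_antisymm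
    · refine Finset.le_inf' _ _ ?_
      intro j hj
      rw [Finset.mem_Icc] at hj
      have hj' : j = a := by omega
      rw [hj']
    · exact Finset.inf'_le _ (Finset.mem_Icc.mpr ⟨le_rfl, by omega⟩)
  | succ d ih =>
    intro a
    rw [List.range_succ, List.map_append, List.foldl_append]
    simp only [List.map_cons, List.map_nil, List.foldl_cons, List.foldl_nil]
    rw [ih a]
    apply le_antisymm
    · refine Finset.le_inf' _ _ ?_
      intro j hj
      rw [Finset.mem_Icc] at hj
      rcases Nat.lt_or_ge j (a + d + 1) with hc | hc
      · refine le_trans (min_le_left _ _) ?_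
        exact Finset.inf'_le _ (Finset.mem_Icc.mpr ⟨hj.1, by omega⟩)
      · have hj' : j = a + 1 + d := by omega
        subst hj'
        exact min_le_right _ _
    · refine le_min ?_ ?_
      · refine Finset.le_inf' _ _ ?_
        intro j hj
        rw [Finset.mem_Icc] at hj
        exact Finset.inf'_le _ (Finset.mem_Icc.mpr ⟨hj.1, by omega⟩)
      · refine Finset.inf'_le _ (Finset.mem_Icc.mpr ⟨by omega, by omega⟩)

theorem dpRow_length (prefix' : List Int) (n : Nat) (dp : List Int) (k : Int) :
    (dpRow prefix' n dp k).length = n + 1 := by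
  unfold dpRow
  rw [List.length_map, PySem.List.length_pyRange_one]
  omega

theorem dpRow_get (l dp : List Int) (K : Nat)
    (_hdp : dp.length = l.length + 1)
    (hgood : ∀ j : Nat, K + 1 ≤ j → j ≤ l.length → dp.getD j 0 = best l K j) :
    ∀ i : Nat, K + 2 ≤ i → i ≤ l.length →
      (dpRow (List.scanl (· + ·) 0 l) l.length dp ((K : Int) + 2)).getD i 0 =
        best l (K + 1) i := by
  intro i hi1 hi2
  set P := List.scanl (· + ·) 0 l with hP
  have hPget : ∀ j : Nat, j ≤ l.length → P.getD j 0 = pfx l j := by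
    intro j hj
    rw [hP, scanl_getD l 0 j hj]
    omega
  -- getD through the outer comprehension
  have houter : (dpRow P l.length dp ((K : Int) + 2)).getD i 0 =
      (if (i : Int) < (K : Int) + 2 then PySem.List.pyGetD dp (i : Int) 0
       else
        (PySem.List.min? ((PySem.List.pyRange ((K : Int) + 2 - 1) (i : Int) 1).map (fun j =>
          max (PySem.List.pyGetD dp j 0)
              (PySem.List.pyGetD P (i : Int) 0 - PySem.List.pyGetD P j 0)))
          (fun x => x)).getD 0) := by
    unfold dpRow
    rw [← PySem.List.pyGetD_natCast]
    rw [PySem.List.pyGetD_map_pyRange_of_nonneg _ _ _ _ (by positivity) (by omega)]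
  rw [houter, if_neg (by omega)]
  -- the candidate range: j = K + 1 + t for t < i - (K + 1)
  have hrw1 : (K : Int) + 2 - 1 = ((K + 1 : Nat) : Int) := by push_cast; ring
  rw [hrw1, PySem.List.pyRange_one]
  obtain ⟨d, hd⟩ : ∃ d, i - (K + 1) = d + 1 := ⟨i - (K + 2), by omega⟩
  have hlen : ((i : Int) - ((K + 1 : Nat) : Int)).toNat = d + 1 := by push_cast; omega
  rw [hlen]
  -- evaluate each candidate
  have hcand : ∀ t : Nat, t < d + 1 →
      (max (PySem.List.pyGetD dp (((K + 1 : Nat) : Int) + (t : Nat)) 0)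
        (PySem.List.pyGetD P (i : Int) 0 -
          PySem.List.pyGetD P (((K + 1 : Nat) : Int) + (t : Nat)) 0)) =
      (fun j => max (best l K j) (pfx l i - pfx l j)) (K + 1 + t) := by
    intro t ht
    have hcast : ((K + 1 : Nat) : Int) + (t : Nat) = ((K + 1 + t : Nat) : Int) := by
      push_cast; ring
    rw [hcast, PySem.List.pyGetD_natCast, PySem.List.pyGetD_natCast, PySem.List.pyGetD_natCast]
    rw [hgood (K + 1 + t) (by omega) (by omega)]
    rw [hPget i hi2, hPget (K + 1 + t) (by omega)]
  -- turn the mapped range into F-applications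
  have hmap : ((List.range (d + 1)).map (fun t => ((K + 1 : Nat) : Int) + (t : Nat))).map
        (fun j => max (PySem.List.pyGetD dp j 0)
          (PySem.List.pyGetD P (i : Int) 0 - PySem.List.pyGetD P j 0)) =
      (List.range (d + 1)).map (fun t => max (best l K (K + 1 + t))
        (pfx l i - pfx l (K + 1 + t))) := by
    rw [List.map_map]
    refine List.map_congr_left ?_
    intro t ht
    rw [List.mem_range] at ht
    exact hcand t ht
  rw [hmap]
  -- split off the head and use minfold
  rw [List.range_succ_eq_map, List.map_cons]
  rw [PySem.List.min?_id_cons]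
  simp only [Option.getD_some]
  have hmap2 : ((List.range d).map Nat.succ).map (fun t =>
        max (best l K (K + 1 + t)) (pfx l i - pfx l (K + 1 + t))) =
      (List.range d).map (fun t =>
        (fun j => max (best l K j) (pfx l i - pfx l j)) (K + 1 + 1 + t)) := by
    rw [List.map_map]
    refine List.map_congr_left ?_
    intro t _
    simp only [Function.comp_apply, Nat.succ_eq_add_one]
    have harg : K + 1 + (t + 1) = K + 1 + 1 + t := by omega
    rw [harg]
  rw [show K + 1 + 0 = K + 1 by omega] at *
  rw [hmap2]
  rw [minfold (fun j => max (best l K j) (pfx l i - pfx l j)) d (K + 1)]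
  rw [best_succ l K i (by omega)]
  congr 1
  · congr 1
    omega

def applyRows (l : List Int) (j : Nat) : List Int :=
  (PySem.List.pyRange 2 ((j : Int) + 1) 1).foldl
    (dpRow (List.scanl (· + ·) 0 l) l.length) (List.scanl (· + ·) 0 l)

theorem applyRows_one (l : List Int) : applyRows l 1 = List.scanl (· + ·) 0 l := by
  unfold applyRows
  rw [PySem.List.pyRange_one_eq_nil (by norm_num)]
  rfl

theorem applyRows_succ (l : List Int) (j : Nat) (hj : 1 ≤ j) :
    applyRows l (j + 1) =
      dpRow (List.scanl (· + ·) 0 l) l.length (applyRows l j) ((j : Int) + 1) := by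
  unfold applyRows
  have hcast : ((j + 1 : Nat) : Int) + 1 = ((j : Int) + 1) + 1 := by push_cast; ring
  rw [hcast]
  rw [PySem.List.pyRange_one_succ_right (by omega)]
  rw [List.foldl_append]
  rfl

theorem applyRows_good (l : List Int) :
    ∀ j, 1 ≤ j → j ≤ l.length →
      ((applyRows l j).length = l.length + 1 ∧
        ∀ i : Nat, j ≤ i → i ≤ l.length → (applyRows l j).getD i 0 = best l (j - 1) i) := by
  intro j
  induction j with
  | zero => omega
  | succ j ih =>
    intro _ hjn
    rcases Nat.lt_or_ge j 1 with hj1 | hj1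
    · -- j = 0 : the first row is the prefix list itself
      have hj0 : j = 0 := by omega
      subst hj0
      rw [applyRows_one]
      refine ⟨scanl_length 0 l, ?_⟩
      intro i hi1 hi2
      rw [scanl_getD l 0 i hi2, best_zero]
      omega
    · -- j ≥ 1 : one more dpRow application
      obtain ⟨hlen, hgood⟩ := ih hj1 (by omega)
      rw [applyRows_succ l j hj1]
      have hcast : ((j : Int) + 1) = ((j - 1 : Nat) : Int) + 2 := by
        have : ((j - 1 : Nat) : Int) = (j : Int) - 1 := by push_cast [hj1]; ring
        rw [this]; ring
      rw [hcast]
      refine ⟨dpRow_length _ _ _ _, ?_⟩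
      intro i hi1 hi2
      have := dpRow_get l (applyRows l j) (j - 1) hlen
        (by intro jj h1 h2
            exact hgood jj (by omega) h2)
        i (by omega) hi2
      rw [this]
      congr 1
      omega

theorem alt_eq_best (l : List Int) (m' : Int) (hnil : l ≠ []) (hmn : m' ≤ l.length) :
    min_max_pages_alt l m' = best l (m'.toNat - 1) l.length := by
  unfold min_max_pages_alt
  rw [if_neg hnil]
  simp only [PySem.List.len_eq]
  rw [if_neg (by omega)]
  rcases Int.lt_or_le m' 2 with hm2 | hm2
  · -- m ≤ 1 : the loop body never runs
    rw [PySem.List.pyRange_one_eq_nil (by omega)]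
    simp only [List.foldl_nil]
    have hn1 : m'.toNat - 1 = 0 := by omega
    rw [hn1, best_zero]
    rw [PySem.List.pyGetD_natCast]
    exact scanl_getD l 0 l.length le_rfl |>.trans (by omega)
  · -- m ≥ 2 : the fold is applyRows at m'.toNat
    have hM : m' = ((m'.toNat : Nat) : Int) := (Int.toNat_of_nonneg (by omega)).symm
    rw [hM]
    have hfold : (PySem.List.pyRange 2 (((m'.toNat : Nat) : Int) + 1) 1).foldl
        (dpRow (List.scanl (· + ·) 0 l) l.length) (List.scanl (· + ·) 0 l) =
        applyRows l m'.toNat := rfl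
    rw [hfold]
    obtain ⟨_, hgood⟩ := applyRows_good l m'.toNat (by omega) (by omega)
    rw [PySem.List.pyGetD_natCast]
    exact hgood l.length (by omega) le_rfl

theorem ports_agree (pages : List Int) (m : Int)
    (hPre : pages = [] ∨ (m ≤ pages.length ∧
      (m ≤ 1 ∨ m = pages.length ∨ ∀ p ∈ pages, 0 ≤ p))) :
    min_max_pages pages m = min_max_pages_alt pages m := by
  by_cases hnil : pages = []
  · unfold min_max_pages min_max_pages_alt
    rw [if_pos hnil, if_pos hnil]
  rcases hPre with h | ⟨hmlen, hcase⟩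
  · exact absurd h hnil
  have hn1 : 0 < pages.length := List.length_pos_iff.mpr hnil
  rw [alt_eq_best pages m hnil hmlen]
  unfold min_max_pages
  rw [if_neg hnil]
  simp only [PySem.List.len_eq]
  rw [if_neg (by omega)]
  obtain ⟨h, tl, rfl⟩ : ∃ h tl, pages = h :: tl := by
    cases pages with
    | nil => exact absurd rfl hnil
    | cons h tl => exact ⟨h, tl, rfl⟩
  set l := h :: tl with hl
  set n := l.length with hn
  by_cases hmeq : m = (n : Int)
  · -- m == len(pages): A returns max(pages), and the DP diagonal is the same value
    rw [if_pos hmeq]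
    have hmt : m.toNat = n := by omega
    rw [hmt]
    have hdiag := best_diag_fold l (n - 1) (by omega)
    rw [show n - 1 + 1 = n from by omega] at hdiag
    rw [hdiag, maxq_cons h tl]
    have hdrop : l.drop 1 = tl := rfl
    have htake : tl.take (n - 1) = tl := by
      apply List.take_of_length_le
      simp [hn, hl]
    have hget0 : l.getD 0 0 = h := rfl
    rw [hdrop, htake, hget0]
  · rw [if_neg hmeq]
    have hmlt : m < (n : Int) := by omega
    have hsum : l.sum = pfx l n := (pfx_len l).symm
    have hK : m.toNat - 1 < n := by omega
    rcases Int.lt_or_le m 2 with hm1 | hm2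
    · -- m ≤ 1 : A's search returns sum(pages); the DP with no iterations is the same
      have hm1' : m ≤ 1 := by omega
      have hB : best l (m.toNat - 1) n = pfx l n := by
        have : m.toNat - 1 = 0 := by omega
        rw [this, best_zero]
      rw [hB]
      by_cases hLS : (PySem.List.max? l (fun x => x)).getD 0 ≤ l.sum
      · by_cases hM : M1 l = pfx l n
        · refine (bs_main l m (pfx l n) ?_ ((l.sum + 1 - (PySem.List.max? l (fun x => x)).getD 0).toNat)
            _ _ _ le_rfl (by omega) (by omega) (by omega)).trans rfl
          intro y
          rw [F_iff_M1 l y m hm1' hn1, hM]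
        · have hMgt : pfx l n < M1 l := by
            have := sum_le_M1 l
            rw [← hn] at this
            omega
          rw [bs_never l m ((l.sum + 1 - (PySem.List.max? l (fun x => x)).getD 0).toNat)
            _ _ _ le_rfl ?_]
          · exact hsum
          · intro y hy1 hy2 hcon
            rw [F_iff_M1 l y m hm1' hn1] at hcon
            omega
      · rw [bsearchA, dif_neg hLS]
        exact hsum
    · -- 2 ≤ m < len(pages): the nonnegative main case
      have hnn : ∀ p ∈ l, 0 ≤ p := by
        rcases hcase with hc | hc | hc
        · omega
        · exact absurd hc hmeq
        · exact hc
      set T := best l (m.toNat - 1) n with hT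
      have hF := F_iff_T l m hnn hn1 (by omega) hmlen
      have hall : ∀ y ∈ l, y ≤ T :=
        elem_all l T (fun t ht => elem_le_best l hnn (m.toNat - 1) n t hK le_rfl ht)
      have hLT : (PySem.List.max? l (fun x => x)).getD 0 ≤ T := by
        rw [hl, maxq_cons h tl]
        exact fold_max_le tl h T (hall h (by rw [hl]; exact List.mem_cons_self))
          (fun y hy => hall y (by rw [hl]; exact List.mem_cons_of_mem h hy))
      have hTS : T ≤ l.sum := by
        rw [hsum]
        exact best_le_pfx l hnn (m.toNat - 1) n hK le_rfl
      exact bs_main l m T hF ((l.sum + 1 - (PySem.List.max? l (fun x => x)).getD 0).toNat)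
        _ _ _ le_rfl hLT (by omega) (by omega)

-- ===== VERDICT (by name: the statement is the Claim_ definition above) =====
theorem min_max_pages_spec : Claim_equal_min_max_pages := by
  intro pages m _ hPre
  unfold Pre_min_max_pages at hPre
  unfold Spec_min_max_pages
  exact ports_agree pages m hPre
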